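-- pv_equiv track=rewrite | github.com/AndHak/Universidad-Semestre2-Python | Python/Menu curses.py | encontrar_mayor_primo_en_diccionario
-- ===== SOURCE A (Python) =====
-- def es_primo(numero):
--     if numero <= 1:
--         return False
--     for i in range(2, int(numero**0.5)+1):
--         if numero % i == 0:
--             return False
--     return True
--
-- def encontrar_mayor_primo_en_diccionario(diccionario):
--     mayor_primo = None
--     clave_mayor_primo = None
--     for clave, valores in diccionario.items():
--         for valor in valores:
--             if es_primo(valor):
--                 if mayor_primo is None or valor > mayor_primo:
--                     mayor_primo = valor
--                     clave_mayor_primo = clave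
--     return mayor_primo, clave_mayor_primo
-- ===== SOURCE B (Python) =====
-- def es_primo(numero):
--     if numero <= 1:
--         return False
--     for i in range(2, int(numero**0.5)+1):
--         if numero % i == 0:
--             return False
--     return True
--
-- def encontrar_mayor_primo_en_diccionario(diccionario):
--     # Sort-then-scan: flatten, stable-sort descending by value, return the first
--     # prime found.  Primality is only tested from the largest value downwards,
--     # stopping at the first prime; stability gives A's first-key tie-break.
--     pares = [(valor, clave) for clave, valores in diccionario.items() for valor in valores]
--     pares.sort(key=lambda p: p[0], reverse=True)
--     for valor, clave in pares:
--         if es_primo(valor):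
--             return valor, clave
--     return None, None
-- ===== Notes on version B (the rewrite author's own statement) =====
-- stated objective: alternative
-- what changed: Replaces A's exhaustive one-pass running-max over all values (primality-testing every value) by sort-then-scan: flatten the dict into (value,key) pairs, stable-sort them descending by value, and return the first prime encountered, so primality is tested lazily from the top; the stable sort reproduces A's strict-> first-key tie-break.
import Mathlib
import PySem

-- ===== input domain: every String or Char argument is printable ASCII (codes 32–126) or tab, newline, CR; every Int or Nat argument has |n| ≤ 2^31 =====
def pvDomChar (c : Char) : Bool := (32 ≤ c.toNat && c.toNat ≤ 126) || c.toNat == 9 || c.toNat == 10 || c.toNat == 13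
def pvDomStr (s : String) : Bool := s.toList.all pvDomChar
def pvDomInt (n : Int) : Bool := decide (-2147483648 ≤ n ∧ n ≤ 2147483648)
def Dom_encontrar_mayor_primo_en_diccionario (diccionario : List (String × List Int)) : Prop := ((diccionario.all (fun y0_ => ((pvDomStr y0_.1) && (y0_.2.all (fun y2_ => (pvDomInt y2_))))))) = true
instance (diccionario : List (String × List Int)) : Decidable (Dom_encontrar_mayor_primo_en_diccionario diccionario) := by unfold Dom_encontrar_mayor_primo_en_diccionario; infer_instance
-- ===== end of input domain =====

-- B replaces A's exhaustive running-max pass by sort-then-scan: flatten into (value,key) pairs,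
-- stable-sort descending by value, return the first prime found; same return value, alternative algorithm.


-- ===== PORT A =====
-- es_primo, shared verbatim by both ports (B keeps A's helper unchanged).
-- int(numero**0.5) is ported as Nat.sqrt, which equals it exactly for 0 ≤ numero ≤ 2^31
-- (CPython's correctly rounded double sqrt cannot cross an integer boundary there);
-- the early-return divisor loop is the short-circuiting .all.
def esPrimo (numero : Int) : Bool :=
  if numero ≤ 1 then false
  else (PySem.List.pyRange 2 ((numero.toNat.sqrt : Int) + 1) 1).all
    (fun i => !(PySem.Int.mod numero i == 0))

-- body of A's inner loop: one value, current (mayor_primo, clave_mayor_primo) state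
def pvInnerA (clave : String) (s : Option Int × Option String) (valor : Int) :
    Option Int × Option String :=
  if esPrimo valor then
    match s.1 with
    | none => (some valor, some clave)
    | some m => if m < valor then (some valor, some clave) else s
  else s

def encontrar_mayor_primo_en_diccionario (diccionario : List (String × List Int)) :
    Option Int × Option String :=
  diccionario.foldl (fun s p => p.2.foldl (pvInnerA p.1) s) (none, none)

-- ===== PORT B =====
def encontrar_mayor_primo_en_diccionario_alt (diccionario : List (String × List Int)) :
    Option Int × Option String :=
  let pares := diccionario.flatMap (fun p => p.2.map (fun v => (v, p.1)))
  let ordenados := PySem.List.sorted pares (fun q => q.1) true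
  match ordenados.find? (fun q => esPrimo q.1) with
  | none => (none, none)
  | some q => (some q.1, some q.2)

-- ===== PRECONDITION & SPEC =====
def Spec_encontrar_mayor_primo_en_diccionario (diccionario : List (String × List Int)) (out : Option Int × Option String) : Prop := out = encontrar_mayor_primo_en_diccionario_alt diccionario
instance (diccionario : List (String × List Int)) (out : Option Int × Option String) : Decidable (Spec_encontrar_mayor_primo_en_diccionario diccionario out) := by unfold Spec_encontrar_mayor_primo_en_diccionario; infer_instance

-- ===== CLAIM (what is proved, stated in full; the proofs are below) =====
def Claim_equal_encontrar_mayor_primo_en_diccionario : Prop := ∀ (diccionario : List (String × List Int)), Dom_encontrar_mayor_primo_en_diccionario diccionario → Spec_encontrar_mayor_primo_en_diccionario diccionario (encontrar_mayor_primo_en_diccionario diccionario)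

-- ===== LEMMAS AND PROOFS =====

-- first-strict-max step over (value, key) pairs: exactly A's update rule
def pvMStep (acc : Option (Int × String)) (p : Int × String) : Option (Int × String) :=
  match acc with
  | none => some p
  | some m => if m.1 < p.1 then some p else some m

def pvEncode : Option (Int × String) → Option Int × Option String
  | none => (none, none)
  | some m => (some m.1, some m.2)

-- the insertion predicate of sorted(·, key = ·.1, reverse = True)
def pvBef (a b : Int × String) : Bool := decide (b.1 < a.1)

def pvPrimePair (q : Int × String) : Bool := esPrimo q.1

-- ===== A-side: A's nested loops compute foldl pvMStep none over the prime pairs =====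
theorem pv_inner (clave : String) (vs : List Int) (acc : Option (Int × String)) :
    vs.foldl (pvInnerA clave) (pvEncode acc)
      = pvEncode (((vs.filter esPrimo).map (fun v => (v, clave))).foldl pvMStep acc) := by
  induction vs generalizing acc with
  | nil => rfl
  | cons v vs ih =>
    by_cases hv : esPrimo v
    · cases acc with
      | none =>
          simp only [List.foldl_cons, List.filter_cons, hv, List.map_cons, pvInnerA, pvEncode,
            pvMStep, if_true]
          exact ih (some (v, clave))
      | some m =>
          simp only [List.foldl_cons, List.filter_cons, hv, List.map_cons, pvInnerA, pvEncode,
            pvMStep, if_true]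
          by_cases hm : m.1 < v
          · simp only [hm, if_true]; exact ih (some (v, clave))
          · simp only [hm, if_false]; exact ih (some m)
    · simp only [List.foldl_cons, List.filter_cons, hv, pvInnerA, if_false, Bool.false_eq_true]
      exact ih acc

theorem pv_outer (d : List (String × List Int)) (acc : Option (Int × String)) :
    d.foldl (fun s p => p.2.foldl (pvInnerA p.1) s) (pvEncode acc)
      = pvEncode ((d.flatMap (fun p => (p.2.filter esPrimo).map (fun v => (v, p.1)))).foldl
          pvMStep acc) := by
  induction d generalizing acc with
  | nil => rfl
  | cons p d ih =>
    simp only [List.foldl_cons, List.flatMap_cons, List.foldl_append]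
    rw [pv_inner p.1 p.2 acc, ih]

-- filtering the primes before or after flattening is the same list of pairs
theorem pv_filter_flat (d : List (String × List Int)) :
    (d.flatMap (fun p => p.2.map (fun v => (v, p.1)))).filter pvPrimePair
      = d.flatMap (fun p => (p.2.filter esPrimo).map (fun v => (v, p.1))) := by
  rw [List.filter_flatMap]
  refine List.flatMap_congr (fun p _ => ?_)
  rw [List.filter_map]
  rfl

-- ===== B-side: head of the insertion, head of the sort, stability =====
theorem pv_head_insertBy (x : Int × String) (acc : List (Int × String)) :
    (PySem.List.insertBy pvBef x acc).head? = pvMStep acc.head? x := by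
  cases acc with
  | nil => rfl
  | cons h t =>
    simp only [PySem.List.insertBy, pvBef, pvMStep, List.head?_cons]
    by_cases hb : h.1 < x.1
    · simp [hb]
    · simp [hb]

theorem pv_head_foldl_ins (G : List (Int × String)) (acc : List (Int × String)) :
    (G.foldl (fun a x => PySem.List.insertBy pvBef x a) acc).head?
      = G.foldl pvMStep acc.head? := by
  induction G generalizing acc with
  | nil => rfl
  | cons x G ih =>
    simp only [List.foldl_cons]
    rw [ih, pv_head_insertBy]

-- if x goes before every element, insertBy puts it at the front
theorem pv_insertBy_front (x : Int × String) (l : List (Int × String))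
    (h : ∀ z ∈ l, pvBef x z = true) :
    PySem.List.insertBy pvBef x l = x :: l := by
  cases l with
  | nil => rfl
  | cons z t => simp [PySem.List.insertBy, h z (List.mem_cons_self)]

-- insertBy preserves the descending-by-value invariant
theorem pv_insertBy_pairwise (x : Int × String) (acc : List (Int × String))
    (h : acc.Pairwise (fun a b => b.1 ≤ a.1)) :
    (PySem.List.insertBy pvBef x acc).Pairwise (fun a b => b.1 ≤ a.1) := by
  induction acc with
  | nil => simp [PySem.List.insertBy]
  | cons y ys ih =>
    rcases List.pairwise_cons.mp h with ⟨hy, hys⟩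
    by_cases hb : y.1 < x.1
    · have : PySem.List.insertBy pvBef x (y :: ys) = x :: y :: ys := by
        simp [PySem.List.insertBy, pvBef, hb]
      rw [this]
      refine List.pairwise_cons.mpr ⟨?_, h⟩
      intro z hz
      rcases List.mem_cons.mp hz with rfl | hz
      · exact le_of_lt hb
      · exact le_trans (hy z hz) (le_of_lt hb)
    · have : PySem.List.insertBy pvBef x (y :: ys)
          = y :: PySem.List.insertBy pvBef x ys := by
        simp [PySem.List.insertBy, pvBef, hb]
      rw [this]
      refine List.pairwise_cons.mpr ⟨?_, ih hys⟩
      intro z hz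
      rcases (PySem.List.mem_insertBy pvBef x z ys).mp hz with rfl | hz
      · exact le_of_not_gt hb
      · exact hy z hz

-- STABILITY, one step: filtering commutes with insertion into a descending list
theorem pv_filter_insertBy (p : Int × String → Bool) (x : Int × String)
    (acc : List (Int × String)) (h : acc.Pairwise (fun a b => b.1 ≤ a.1)) :
    (PySem.List.insertBy pvBef x acc).filter p
      = if p x then PySem.List.insertBy pvBef x (acc.filter p) else acc.filter p := by
  induction acc with
  | nil =>
    by_cases hx : p x <;> simp [PySem.List.insertBy, hx]
  | cons y ys ih =>
    rcases List.pairwise_cons.mp h with ⟨hy, hys⟩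
    by_cases hb : y.1 < x.1
    · have hins : PySem.List.insertBy pvBef x (y :: ys) = x :: y :: ys := by
        simp [PySem.List.insertBy, pvBef, hb]
      rw [hins]
      by_cases hx : p x
      · by_cases hpy : p y
        · have : PySem.List.insertBy pvBef x (y :: ys.filter p)
              = x :: y :: ys.filter p := by
            simp [PySem.List.insertBy, pvBef, hb]
          simp [hx, hpy, this]
        · have hfront : PySem.List.insertBy pvBef x (ys.filter p) = x :: ys.filter p := by
            refine pv_insertBy_front x _ (fun z hz => ?_)
            have hz' : z ∈ ys := List.mem_of_mem_filter hz
            simp only [pvBef, decide_eq_true_eq]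
            exact lt_of_le_of_lt (hy z hz') hb
          simp [hx, hpy, hfront]
      · simp [List.filter_cons, hx]
    · have hins : PySem.List.insertBy pvBef x (y :: ys)
          = y :: PySem.List.insertBy pvBef x ys := by
        simp [PySem.List.insertBy, pvBef, hb]
      rw [hins]
      by_cases hx : p x
      · by_cases hpy : p y
        · have : PySem.List.insertBy pvBef x (y :: ys.filter p)
              = y :: PySem.List.insertBy pvBef x (ys.filter p) := by
            simp [PySem.List.insertBy, pvBef, hb]
          simp [hpy, hx, this, ih hys]
        · simp [hpy, hx, ih hys]
      · by_cases hpy : p y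
        · simp [hpy, hx, ih hys]
        · simp [hpy, hx, ih hys]

-- STABILITY: filtering commutes with the whole insertion sort
theorem pv_filter_foldl_ins (p : Int × String → Bool) (P : List (Int × String))
    (acc : List (Int × String)) (h : acc.Pairwise (fun a b => b.1 ≤ a.1)) :
    (P.foldl (fun a x => PySem.List.insertBy pvBef x a) acc).filter p
      = (P.filter p).foldl (fun a x => PySem.List.insertBy pvBef x a) (acc.filter p) := by
  induction P generalizing acc with
  | nil => rfl
  | cons x P ih =>
    simp only [List.foldl_cons, List.filter_cons]
    rw [ih _ (pv_insertBy_pairwise x acc h), pv_filter_insertBy p x acc h]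
    by_cases hx : p x <;> simp [hx]

-- the reverse=True sort over key ·.1 is the pvBef insertion fold
theorem pv_sorted_eq (xs : List (Int × String)) :
    PySem.List.sorted xs (fun q => q.1) true
      = xs.foldl (fun a x => PySem.List.insertBy pvBef x a) [] :=
  PySem.List.sorted_rev_eq_foldl_insertBy xs (fun q => q.1)

-- B's port, rewritten to the pvEncode form of the first-max fold over the prime pairs
theorem pv_B_eq (d : List (String × List Int)) :
    encontrar_mayor_primo_en_diccionario_alt d
      = pvEncode ((d.flatMap (fun p => (p.2.filter esPrimo).map (fun v => (v, p.1)))).foldl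
          pvMStep none) := by
  unfold encontrar_mayor_primo_en_diccionario_alt
  show (match (PySem.List.sorted (d.flatMap fun p => p.2.map fun v => (v, p.1)) (fun q => q.1)
      true).find? (fun q => esPrimo q.1) with
    | none => ((none : Option Int), (none : Option String))
    | some q => (some q.1, some q.2))
    = pvEncode ((d.flatMap (fun p => (p.2.filter esPrimo).map (fun v => (v, p.1)))).foldl
        pvMStep none)
  rw [show (fun q : Int × String => esPrimo q.1) = pvPrimePair from rfl,
    show (PySem.List.sorted (d.flatMap fun p => p.2.map fun v => (v, p.1)) (fun q => q.1)
        true).find? pvPrimePair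
      = ((PySem.List.sorted (d.flatMap fun p => p.2.map fun v => (v, p.1)) (fun q => q.1)
        true).filter pvPrimePair).head? from Eq.symm (List.head?_filter ..),
    pv_sorted_eq, pv_filter_foldl_ins pvPrimePair _ [] (List.Pairwise.nil), List.filter_nil,
    pv_head_foldl_ins, pv_filter_flat]
  simp only [List.head?_nil]
  cases (d.flatMap (fun p => (p.2.filter esPrimo).map (fun v => (v, p.1)))).foldl pvMStep none with
  | none => rfl
  | some q => rfl

-- ===== VERDICT (by name: the statement is the Claim_ definition above) =====
theorem encontrar_mayor_primo_en_diccionario_spec : Claim_equal_encontrar_mayor_primo_en_diccionario := by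
  intro d _
  unfold Spec_encontrar_mayor_primo_en_diccionario
  unfold encontrar_mayor_primo_en_diccionario
  rw [pv_B_eq d]
  exact pv_outer d none
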